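-- pv_equiv track=rewrite | github.com/i-hyejin/Algorithm | Programmers/pick_tangerines.py | solution
-- ===== SOURCE A (Python) =====
-- from collections import Counter
--
-- def solution(k, tangerine):
--     answer = 0
--
--     t_counter = Counter(tangerine).items()                          # 종류 별 개수 세기
--     t_counter = sorted(t_counter, reverse=True, key=lambda x: x[1]) # 개수 기준으로 내림차순 정렬
--
--     for key, value in t_counter:
--         if k > 0:                                                   # 귤을 더 담아야 하면
--             k -= value                                              # 현재 개수만큼 빼기
--             answer += 1                                             # 한 종류 추가
--
--     return answer
-- ===== SOURCE B (Python) =====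
-- def solution(k, tangerine):
--     # counting buckets (frequency-of-frequency) walked from the largest count down; no sort.
--     cnt = {}
--     for t in tangerine:
--         cnt[t] = cnt.get(t, 0) + 1
--     freq = {}
--     for c in cnt.values():
--         freq[c] = freq.get(c, 0) + 1
--     answer = 0
--     f = len(tangerine)
--     while f > 0 and k > 0:
--         kinds = freq.get(f, 0)
--         while kinds > 0 and k > 0:
--             k -= f
--             answer += 1
--             kinds -= 1
--         f -= 1
--     return answer
-- ===== Notes on version B (the rewrite author's own statement) =====
-- stated objective: alternative
-- what changed: B replaces Counter-then-sort-descending over the per-kind counts by counting buckets: it builds a frequency-of-frequency dict and greedily walks possible counts from len(tangerine) down to 1, so no sort is performed.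
import Mathlib
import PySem

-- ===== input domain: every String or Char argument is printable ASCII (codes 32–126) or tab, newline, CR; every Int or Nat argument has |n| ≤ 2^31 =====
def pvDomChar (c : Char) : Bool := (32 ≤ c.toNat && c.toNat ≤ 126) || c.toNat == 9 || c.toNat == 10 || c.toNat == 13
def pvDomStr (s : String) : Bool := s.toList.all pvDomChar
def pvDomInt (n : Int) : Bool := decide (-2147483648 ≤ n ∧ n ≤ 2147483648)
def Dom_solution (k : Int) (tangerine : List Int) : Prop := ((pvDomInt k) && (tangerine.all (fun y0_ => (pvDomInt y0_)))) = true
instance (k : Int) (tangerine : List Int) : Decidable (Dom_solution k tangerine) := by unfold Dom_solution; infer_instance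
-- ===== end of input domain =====

-- B replaces the sort of the per-kind counts by frequency-of-frequency buckets
-- traversed from the largest possible count down (objective: alternative algorithm, no sort).

-- ===== PORT A =====
def solution (k : Int) (tangerine : List Int) : Int :=
  let answer : Int := 0
  let t_counter := (PySem.Dict.counter tangerine).items
  let t_counter := PySem.List.sorted t_counter (fun x => x.2) true
  let st := t_counter.foldl
    (fun (st : Int × Int) (kv : Int × Int) =>
      if st.1 > 0 then (st.1 - kv.2, st.2 + 1) else st)
    (k, answer)
  st.2

-- ===== PORT B =====
-- inner 'while kinds > 0 and k > 0' loop of Source B; returns (k, answer)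
def altInner (f kinds k answer : Int) : Int × Int :=
  if h : kinds > 0 ∧ k > 0 then altInner f (kinds - 1) (k - f) (answer + 1)
  else (k, answer)
termination_by kinds.toNat
decreasing_by omega

-- outer 'while f > 0 and k > 0' loop of Source B
def altOuter (freq : PySem.Dict Int Int) (f k answer : Int) : Int :=
  if h : f > 0 ∧ k > 0 then
    let r := altInner f (freq.getD f 0) k answer
    altOuter freq (f - 1) r.1 r.2
  else answer
termination_by f.toNat
decreasing_by omega

def solution_alt (k : Int) (tangerine : List Int) : Int :=
  let cnt := tangerine.foldl (fun d t => d.insert t (d.getD t 0 + 1)) PySem.Dict.empty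
  let freq := cnt.values.foldl (fun d c => d.insert c (d.getD c 0 + 1)) PySem.Dict.empty
  altOuter freq (tangerine.length : Int) k 0

-- ===== PRECONDITION & SPEC =====
def Spec_solution (k : Int) (tangerine : List Int) (out : Int) : Prop := out = solution_alt k tangerine
instance (k : Int) (tangerine : List Int) (out : Int) : Decidable (Spec_solution k tangerine out) := by unfold Spec_solution; infer_instance

-- ===== CLAIM (what is proved, stated in full; the proofs are below) =====
def Claim_equal_solution : Prop := ∀ (k : Int) (tangerine : List Int), Dom_solution k tangerine → Spec_solution k tangerine (solution k tangerine)

-- ===== LEMMAS AND PROOFS =====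

-- the common loop body: take one kind of count v if we still need fruit
def pvStep (st : Int × Int) (v : Int) : Int × Int :=
  if st.1 > 0 then (st.1 - v, st.2 + 1) else st

-- B's sequence of counts: for f = n..1, one copy of f per kind with count f
def pvBvals (freq : PySem.Dict Int Int) (f : Int) : List Int :=
  (PySem.List.pyRange f 0 (-1)).flatMap (fun g => List.replicate (freq.getD g 0).toNat g)

theorem pvStep_noop (st : Int × Int) (l : List Int) (h : st.1 ≤ 0) :
    l.foldl pvStep st = st := by
  induction l with
  | nil => rfl
  | cons x t ih => simpa [pvStep, not_lt.mpr h] using ih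

theorem altInner_eq_foldl (f kinds k answer : Int) :
    altInner f kinds k answer = List.foldl pvStep (k, answer) (List.replicate kinds.toNat f) := by
  induction kinds, k, answer using altInner.induct f with
  | case1 kinds k answer h ih =>
    rw [altInner, dif_pos h]
    have hn : kinds.toNat = (kinds - 1).toNat + 1 := by omega
    rw [hn, List.replicate_succ, List.foldl_cons]
    have hs : pvStep (k, answer) f = (k - f, answer + 1) := by
      simp [pvStep, h.2]
    rw [hs]; exact ih
  | case2 kinds k answer h =>
    rw [altInner, dif_neg h]
    by_cases hk : kinds ≤ 0
    · have : kinds.toNat = 0 := by omega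
      simp [this]
    · have hk2 : k ≤ 0 := by omega
      rw [pvStep_noop _ _ hk2]

theorem altOuter_eq_foldl (freq : PySem.Dict Int Int) (f k answer : Int) :
    altOuter freq f k answer = (List.foldl pvStep (k, answer) (pvBvals freq f)).2 := by
  induction f, k, answer using altOuter.induct freq with
  | case1 f k answer h r ih =>
    rw [altOuter, dif_pos h]
    rw [pvBvals, PySem.List.pyRange_neg_one_cons h.1, List.flatMap_cons, List.foldl_append]
    have hr : r = List.foldl pvStep (k, answer) (List.replicate (freq.getD f 0).toNat f) :=
      altInner_eq_foldl _ _ _ _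
    rw [show (List.foldl pvStep (k, answer) (List.replicate (freq.getD f 0).toNat f)) = r from hr.symm,
        show (r.1, r.2) = r from rfl] at *
    simpa [pvBvals] using ih
  | case2 f k answer h =>
    rw [altOuter, dif_neg h]
    by_cases hf : f ≤ 0
    · rw [pvBvals, PySem.List.pyRange_neg_one_eq_nil hf]
      simp
    · have hk : k ≤ 0 := by omega
      rw [pvStep_noop _ _ hk]

theorem flatMap_replicate_pairwise (l : List Int) (m : Int → Nat)
    (h : l.Pairwise (fun a b => b < a)) :
    (l.flatMap (fun g => List.replicate (m g) g)).Pairwise (fun a b => b ≤ a) := by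
  induction l with
  | nil => simp
  | cons x t ih =>
    rw [List.flatMap_cons, List.pairwise_append]
    rcases List.pairwise_cons.mp h with ⟨hx, ht⟩
    refine ⟨List.pairwise_replicate.mpr (Or.inr le_rfl), ih ht, ?_⟩
    intro a ha b hb
    rcases List.mem_flatMap.mp hb with ⟨g, hg, hbg⟩
    rw [List.eq_of_mem_replicate ha, List.eq_of_mem_replicate hbg]
    exact le_of_lt (hx g hg)

theorem pvBvals_pairwise (freq : PySem.Dict Int Int) (f : Int) :
    (pvBvals freq f).Pairwise (fun a b => b ≤ a) := by
  apply flatMap_replicate_pairwise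
  rw [PySem.List.pyRange_neg_one_eq_reverse, List.pairwise_reverse]
  exact PySem.List.pairwise_lt_pyRange_one _ _

theorem count_flatMap_replicate (l : List Int) (m : Int → Nat) (v : Int)
    (hnd : l.Nodup) :
    (l.flatMap (fun g => List.replicate (m g) g)).count v = if v ∈ l then m v else 0 := by
  induction l with
  | nil => simp
  | cons x t ih =>
    rcases List.nodup_cons.mp hnd with ⟨hx, ht⟩
    rw [List.flatMap_cons, List.count_append, ih ht, List.count_replicate]
    by_cases hv : v = x
    · subst hv; simp [hx]
    · simp [hv, Ne.symm hv]

theorem mem_values_counter (tangerine : List Int) (v : Int)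
    (hv : v ∈ (PySem.Dict.counter tangerine).values) :
    0 < v ∧ v ≤ (tangerine.length : Int) := by
  rw [PySem.Dict.values_eq_map_keys _ (PySem.Dict.nodup_keys_counter tangerine) 0] at hv
  rcases List.mem_map.mp hv with ⟨x, hx, hvx⟩
  rw [PySem.Dict.keys_counter] at hx
  have hxmem : x ∈ tangerine := (PySem.Set.mem_ofList _ _).mp hx
  rw [PySem.Dict.getD_counter] at hvx
  subst hvx
  constructor
  · exact_mod_cast List.count_pos_iff.mpr hxmem
  · exact_mod_cast List.count_le_length
theorem pvBvals_perm (tangerine : List Int) :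
    (pvBvals (PySem.Dict.counter (PySem.Dict.counter tangerine).values) (tangerine.length : Int)).Perm
      (PySem.Dict.counter tangerine).values := by
  apply List.perm_iff_count.mpr
  intro v
  set vals := (PySem.Dict.counter tangerine).values with hvals
  have hnd : (PySem.List.pyRange (tangerine.length : Int) 0 (-1)).Nodup := by
    rw [PySem.List.pyRange_neg_one_eq_reverse, List.nodup_reverse]
    exact PySem.List.nodup_pyRange_one _ _
  rw [pvBvals, count_flatMap_replicate _ _ _ hnd]
  rw [PySem.Dict.getD_counter]
  by_cases hm : v ∈ PySem.List.pyRange (tangerine.length : Int) 0 (-1)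
  · simp [hm, Int.toNat_natCast]
  · rw [if_neg hm]
    rw [PySem.List.mem_pyRange_neg_one] at hm
    have : v ∉ vals := fun hc => hm ⟨(mem_values_counter tangerine v hc).1, (mem_values_counter tangerine v hc).2⟩
    simp [List.count_eq_zero_of_not_mem this]

theorem pvAvals_eq_pvBvals (tangerine : List Int) :
    (PySem.List.sorted (PySem.Dict.counter tangerine).items (fun x => x.2) true).map (·.2)
      = pvBvals (PySem.Dict.counter (PySem.Dict.counter tangerine).values) (tangerine.length : Int) := by
  haveI : Std.Antisymm (fun (a b : Int) => b ≤ a) := ⟨fun a b h1 h2 => le_antisymm h2 h1⟩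
  refine List.Perm.eq_of_pairwise' (r := fun a b => b ≤ a) ?_ ?_ ?_
  · rw [List.pairwise_map]
    exact PySem.List.sorted_pairwise_rev _ _
  · exact pvBvals_pairwise _ _
  · have h1 : ((PySem.List.sorted (PySem.Dict.counter tangerine).items (fun x => x.2) true).map (·.2)).Perm
        ((PySem.Dict.counter tangerine).items.map (·.2)) :=
      (PySem.List.sorted_perm _ _ _).map _
    have h2 := pvBvals_perm tangerine
    have hval : (PySem.Dict.counter tangerine).items.map (·.2) = (PySem.Dict.counter tangerine).values := rfl
    rw [hval] at h1
    exact h1.trans h2.symm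

-- ===== VERDICT (by name: the statement is the Claim_ definition above) =====
theorem solution_spec : Claim_equal_solution := by
  intro k tangerine _
  unfold Spec_solution solution solution_alt
  simp only [PySem.Dict.foldl_insert_getD_add_one_eq_counter, altOuter_eq_foldl,
             ← pvAvals_eq_pvBvals, List.foldl_map]
  rfl
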